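-- pv_equiv track=rewrite | github.com/PowerDNS/pdns | pdns/dnsdistdist/actions-generator.py | get_cpp_object_name
-- ===== SOURCE A (Python) =====
-- def get_cpp_object_name(name, is_class=True):
--     object_name = ''
--     capitalize = is_class
--     for char in name:
--         if char == '-':
--             capitalize = True
--             continue
--         if capitalize:
--             char = char.upper()
--             capitalize = False
--         object_name += char
--
--     return object_name
-- ===== SOURCE B (Python) =====
-- def get_cpp_object_name(name, is_class=True):
--     out = ''
--     for idx, part in enumerate(name.split('-')):
--         if part:
--             out += (part[0].upper() + part[1:]) if (idx > 0 or is_class) else part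
--     return out
-- ===== Notes on version B (the rewrite author's own statement) =====
-- stated objective: idiomatic
-- what changed: replaces the char-by-char loop with a carried capitalize flag (and per-char string concatenation) by split-on-hyphen then per-part first-letter uppercasing keyed on the part index, concatenating whole parts
import Mathlib
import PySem

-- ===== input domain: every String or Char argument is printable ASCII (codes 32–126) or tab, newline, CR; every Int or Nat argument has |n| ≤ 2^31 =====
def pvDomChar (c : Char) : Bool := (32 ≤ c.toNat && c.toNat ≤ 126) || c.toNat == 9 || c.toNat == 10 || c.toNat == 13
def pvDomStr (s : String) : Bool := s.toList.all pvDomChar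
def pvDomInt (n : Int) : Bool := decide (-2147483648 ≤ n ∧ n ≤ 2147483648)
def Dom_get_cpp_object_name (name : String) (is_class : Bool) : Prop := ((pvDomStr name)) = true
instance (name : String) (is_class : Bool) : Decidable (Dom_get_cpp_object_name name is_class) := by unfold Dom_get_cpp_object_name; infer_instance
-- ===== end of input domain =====

-- B builds the name by splitting on '-' and uppercasing each part's first letter (by part index),
-- instead of A's char-by-char loop with a carried capitalize flag; same O(n) cost.

-- ===== PORT A =====
-- A's loop: state = (object_name, capitalize); char.upper() on one char = PySem.Chars.upperChar (exact on ASCII)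
def get_cpp_object_name (name : String) (is_class : Bool) : String :=
  String.ofList
    (name.toList.foldl
      (fun (st : List Char × Bool) ch =>
        if ch = '-' then (st.1, true)
        else if st.2 then (st.1 ++ [PySem.Chars.upperChar ch], false)
        else (st.1 ++ [ch], false))
      ([], is_class)).1

-- ===== PORT B =====
-- hand port of name.split('-') (single-char separator: split at every '-', empty parts kept, '' -> ['']); exact
def pvSplitDash : List Char → List (List Char)
  | [] => [[]]
  | c :: cs =>
    if c = '-' then [] :: pvSplitDash cs
    else
      match pvSplitDash cs with
      | p :: ps => (c :: p) :: ps
      | [] => [[c]]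

-- part[0].upper() + part[1:] (only applied to non-empty parts)
def pvCapPart : List Char → List Char
  | [] => []
  | c :: cs => PySem.Chars.upperChar c :: cs

def get_cpp_object_name_alt (name : String) (is_class : Bool) : String :=
  String.ofList ((PySem.List.enumerate (pvSplitDash name.toList) 0).foldl
    (fun (out : List Char) pr =>
      if pr.2 = [] then out
      else if decide (0 < pr.1) || is_class then out ++ pvCapPart pr.2
      else out ++ pr.2)
    [])

-- ===== PRECONDITION & SPEC =====
def Spec_get_cpp_object_name (name : String) (is_class : Bool) (out : String) : Prop := out = get_cpp_object_name_alt name is_class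
instance (name : String) (is_class : Bool) (out : String) : Decidable (Spec_get_cpp_object_name name is_class out) := by unfold Spec_get_cpp_object_name; infer_instance

-- ===== CLAIM (what is proved, stated in full; the proofs are below) =====
def Claim_equal_get_cpp_object_name : Prop := ∀ (name : String) (is_class : Bool), Dom_get_cpp_object_name name is_class → Spec_get_cpp_object_name name is_class (get_cpp_object_name name is_class)

-- ===== LEMMAS AND PROOFS =====

-- A's loop as a function of the remaining chars and the current flag
def pvFA : List Char → Bool → List Char
  | [], _ => []
  | c :: cs, cap =>
    if c = '-' then pvFA cs true
    else (if cap then PySem.Chars.upperChar c else c) :: pvFA cs false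

lemma pvFA_spec (cs : List Char) (acc : List Char) (cap : Bool) :
    (cs.foldl
      (fun (st : List Char × Bool) ch =>
        if ch = '-' then (st.1, true)
        else if st.2 then (st.1 ++ [PySem.Chars.upperChar ch], false)
        else (st.1 ++ [ch], false))
      (acc, cap)).1 = acc ++ pvFA cs cap := by
  induction cs generalizing acc cap with
  | nil => simp [pvFA]
  | cons c cs ih =>
    by_cases h : c = '-'
    · simp [pvFA, h, List.foldl, ih]
    · cases cap <;> simp [pvFA, h, List.foldl, ih]

-- B's per-part transform with the flag that governs the part's first char
def pvCap (cap : Bool) (p : List Char) : List Char :=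
  if cap then pvCapPart p else p

def pvProcParts : Bool → List (List Char) → List Char
  | _, [] => []
  | cap, p :: ps => pvCap cap p ++ pvProcParts true ps

lemma pvSplitDash_ne_nil (cs : List Char) : pvSplitDash cs ≠ [] := by
  cases cs with
  | nil => simp [pvSplitDash]
  | cons c cs =>
    unfold pvSplitDash
    split
    · simp
    · cases h : pvSplitDash cs <;> simp

-- A's carried flag = B's part structure
lemma pvFA_eq_procParts (cs : List Char) (cap : Bool) :
    pvFA cs cap = pvProcParts cap (pvSplitDash cs) := by
  induction cs generalizing cap with
  | nil => simp [pvFA, pvSplitDash, pvProcParts, pvCap, pvCapPart]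
  | cons c cs ih =>
    by_cases h : c = '-'
    · simp [pvFA, h, pvSplitDash, pvProcParts, pvCap, pvCapPart, ih]
    · cases hs : pvSplitDash cs with
      | nil => exact absurd hs (pvSplitDash_ne_nil cs)
      | cons p ps =>
        have ihc := ih false
        rw [hs] at ihc
        simp only [pvFA, pvSplitDash, h, hs, ihc]
        cases cap <;> simp [pvProcParts, pvCap, pvCapPart]

-- B's foldl over enumerated tail parts (index ≥ 1): the index test is always true
lemma pvFoldB_tail (ps : List (List Char)) (is_class : Bool) (s : Int) (hs : 1 ≤ s)
    (out : List Char) :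
    (PySem.List.enumerate ps s).foldl
      (fun (out : List Char) pr =>
        if pr.2 = [] then out
        else if decide (0 < pr.1) || is_class then out ++ pvCapPart pr.2
        else out ++ pr.2) out = out ++ pvProcParts true ps := by
  induction ps generalizing s out with
  | nil => simp [PySem.List.enumerate_nil, pvProcParts]
  | cons p ps ih =>
    rw [PySem.List.enumerate_cons, List.foldl_cons]
    have h0 : decide ((0 : Int) < s) = true := decide_eq_true (by omega)
    by_cases hp : p = []
    · simp only [hp]
      rw [ih (s + 1) (by omega)]
      simp [pvProcParts, pvCap, pvCapPart]
    · simp only [if_neg hp, h0, Bool.true_or]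
      rw [ih (s + 1) (by omega)]
      simp [pvProcParts, pvCap, List.append_assoc]

-- B's whole fold = pvProcParts is_class
lemma pvFoldB (parts : List (List Char)) (is_class : Bool) (hne : parts ≠ []) :
    (PySem.List.enumerate parts 0).foldl
      (fun (out : List Char) pr =>
        if pr.2 = [] then out
        else if decide (0 < pr.1) || is_class then out ++ pvCapPart pr.2
        else out ++ pr.2) [] = pvProcParts is_class parts := by
  cases parts with
  | nil => exact absurd rfl hne
  | cons p ps =>
    rw [PySem.List.enumerate_cons, List.foldl_cons,
        show (0 : Int) + 1 = 1 from rfl, pvFoldB_tail ps is_class 1 le_rfl]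
    cases is_class <;> by_cases hp : p = [] <;>
      simp [pvProcParts, pvCap, pvCapPart, hp]

-- ===== VERDICT (by name: the statement is the Claim_ definition above) =====
theorem get_cpp_object_name_spec : Claim_equal_get_cpp_object_name := by
  intro name is_class _
  unfold Spec_get_cpp_object_name get_cpp_object_name get_cpp_object_name_alt
  rw [pvFoldB _ _ (pvSplitDash_ne_nil _)]
  simp only [pvFA_spec name.toList [] is_class, List.nil_append, pvFA_eq_procParts]
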